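-- pv_equiv track=rewrite | github.com/pranshu28/euler_project | Bouncy numbers.py | check
-- ===== SOURCE A (Python) =====
-- def check(n):
--     x=sorted(str(n))
--     z=[]
--     for i in str(n):
--         z.append(i)
--     if x==z or x[::-1]==z:
--         return False
--     return True
-- ===== SOURCE B (Python) =====
-- def check(n):
--     s = str(n)
--     non_dec = True
--     non_inc = True
--     for a, b in zip(s, s[1:]):
--         if a > b:
--             non_dec = False
--         if a < b:
--             non_inc = False
--     return not (non_dec or non_inc)
-- ===== Notes on version B (the rewrite author's own statement) =====
-- stated objective: faster
-- what changed: Replaced sorting the digit string and comparing it (and its reverse) against a rebuilt copy by a single linear scan of adjacent characters maintaining non-decreasing/non-increasing flags.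
import Mathlib
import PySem

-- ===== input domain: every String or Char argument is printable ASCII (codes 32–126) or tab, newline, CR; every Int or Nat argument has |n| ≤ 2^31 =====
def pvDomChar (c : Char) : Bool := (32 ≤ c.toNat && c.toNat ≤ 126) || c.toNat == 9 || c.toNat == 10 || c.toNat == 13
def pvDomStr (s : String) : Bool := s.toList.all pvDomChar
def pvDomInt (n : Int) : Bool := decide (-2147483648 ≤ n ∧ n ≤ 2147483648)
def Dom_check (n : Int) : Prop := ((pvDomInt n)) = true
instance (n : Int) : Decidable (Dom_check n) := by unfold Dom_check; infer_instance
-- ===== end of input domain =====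

-- B replaces sorting str(n) and comparing with a rebuilt copy (and its reverse)
-- by one linear scan of adjacent characters with two monotonicity flags (objective: faster).

-- ===== PORT A =====
def check (n : Int) : Bool :=
  let x := PySem.List.sorted (PySem.Int.toChars n) (fun c => c) false
  let z := (PySem.Int.toChars n).foldl (fun acc i => acc ++ [i]) []
  if x = z ∨ (PySem.List.slice? x none none (-1)).getD [] = z then false else true

-- ===== PORT B =====
def check_alt (n : Int) : Bool :=
  let s := PySem.Int.toChars n
  let p := (s.zip s.tail).foldl
      (fun (p : Bool × Bool) q =>
        (if q.2 < q.1 then false else p.1, if q.1 < q.2 then false else p.2))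
      (true, true)
  !(p.1 || p.2)

-- ===== PRECONDITION & SPEC =====
def Spec_check (n : Int) (out : Bool) : Prop := out = check_alt n
instance (n : Int) (out : Bool) : Decidable (Spec_check n out) := by unfold Spec_check; infer_instance

-- ===== CLAIM (what is proved, stated in full; the proofs are below) =====
def Claim_equal_check : Prop := ∀ (n : Int), Dom_check n → Spec_check n (check n)

-- ===== LEMMAS AND PROOFS =====

theorem foldl_app_singleton (s acc : List Char) :
    s.foldl (fun acc i => acc ++ [i]) acc = acc ++ s := by
  induction s generalizing acc with
  | nil => simp
  | cons a t ih => simp [List.foldl, ih]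

theorem flags_foldl (l : List (Char × Char)) (b1 b2 : Bool) :
    l.foldl (fun (p : Bool × Bool) q =>
        (if q.2 < q.1 then false else p.1, if q.1 < q.2 then false else p.2)) (b1, b2)
    = (b1 && l.all (fun q => !(q.2 < q.1)), b2 && l.all (fun q => !(q.1 < q.2))) := by
  induction l generalizing b1 b2 with
  | nil => simp
  | cons a t ih =>
    simp only [List.foldl, List.all_cons]
    rw [ih]
    by_cases h1 : a.2 < a.1 <;> by_cases h2 : a.1 < a.2 <;> simp [h1, h2]

theorem all_zip_iff_chain' (R : Char → Char → Prop) [DecidableRel R] (s : List Char) :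
    (s.zip s.tail).all (fun q => decide (R q.1 q.2)) = true ↔ List.IsChain R s := by
  induction s with
  | nil => simp
  | cons a t ih =>
    cases t with
    | nil => simp
    | cons b u =>
      simp only [List.tail_cons, List.zip_cons_cons, List.all_cons, Bool.and_eq_true,
        decide_eq_true_iff, List.isChain_cons_cons]
      rw [← ih]
      simp

theorem sorted_eq_iff_pairwise (s : List Char) :
    PySem.List.sorted s (fun c => c) false = s ↔ s.Pairwise (· ≤ ·) := by
  constructor
  · intro h
    have := PySem.List.sorted_pairwise s (fun c => c) (κ := Char)
    rwa [h] at this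
  · intro h
    exact PySem.List.sorted_eq_self_of_pairwise _ _ h

theorem rev_sorted_eq_iff_pairwise (s : List Char) :
    (PySem.List.sorted s (fun c => c) false).reverse = s ↔ s.Pairwise (· ≥ ·) := by
  constructor
  · intro h
    have hp := PySem.List.sorted_pairwise s (fun c => c) (κ := Char)
    have : s.reverse.Pairwise (fun a b : Char => a ≤ b) := by
      rw [← h, List.reverse_reverse]; exact hp
    have := (List.pairwise_reverse).1 this
    exact this.imp (fun h => h)
  · intro h
    have h1 : s.reverse.Pairwise (fun a b : Char => (fun c => c) a ≤ (fun c => c) b) := by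
      rw [List.pairwise_reverse]; exact h.imp (fun h => h)
    have h2 : (PySem.List.sorted s (fun c => c) false).Perm s.reverse :=
      (PySem.List.sorted_perm _ _ _).trans (List.reverse_perm s).symm
    have := PySem.List.eq_of_perm_of_pairwise_le_of_injective (fun c : Char => c)
      (fun _ _ h => h) h2 (PySem.List.sorted_pairwise s (fun c => c)) h1
    rw [this, List.reverse_reverse]

theorem check_eq (n : Int) : check n = check_alt n := by
  unfold check check_alt
  set s := PySem.Int.toChars n with hs
  simp only [foldl_app_singleton, List.nil_append,
    PySem.List.slice?_none_none_neg_one, Option.getD_some, flags_foldl, Bool.true_and]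
  have hnd : ((s.zip s.tail).all (fun q => !(q.2 < q.1)) = true) ↔
      PySem.List.sorted s (fun c => c) false = s := by
    rw [sorted_eq_iff_pairwise, ← List.isChain_iff_pairwise]
    rw [show (fun q : Char × Char => !(q.2 < q.1)) = (fun q : Char × Char => decide (q.1 ≤ q.2))
      by funext q; simp [← decide_not]]
    exact all_zip_iff_chain' (· ≤ ·) s
  have hni : ((s.zip s.tail).all (fun q => !(q.1 < q.2)) = true) ↔
      (PySem.List.sorted s (fun c => c) false).reverse = s := by
    rw [rev_sorted_eq_iff_pairwise, ← List.isChain_iff_pairwise]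
    rw [show (fun q : Char × Char => !(q.1 < q.2)) = (fun q : Char × Char => decide (q.2 ≤ q.1))
      by funext q; simp [← decide_not]]
    exact all_zip_iff_chain' (· ≥ ·) s
  by_cases h : PySem.List.sorted s (fun c => c) false = s ∨
      (PySem.List.sorted s (fun c => c) false).reverse = s
  · simp only [h, if_true]
    rcases h with h | h
    · simp [hnd.2 h]
    · simp [hni.2 h]
  · rw [not_or] at h
    have h1 : (s.zip s.tail).all (fun q => !(q.2 < q.1)) = false := by
      rw [← Bool.not_eq_true]; intro hc; exact h.1 (hnd.1 hc)
    have h2 : (s.zip s.tail).all (fun q => !(q.1 < q.2)) = false := by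
      rw [← Bool.not_eq_true]; intro hc; exact h.2 (hni.1 hc)
    simp [h1, h2, h.1, h.2]

-- ===== VERDICT (by name: the statement is the Claim_ definition above) =====
theorem check_spec : Claim_equal_check := by
  intro n _
  unfold Spec_check
  exact check_eq n
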